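-- pv_equiv track=rewrite | github.com/KitchenGun/hermes-hybrid | src/hermes_adapter/adapter.py | _providers_compatible
-- ===== SOURCE A (Python) =====
-- _PROVIDER_ALIASES: dict[str, set[str]] = {
--     "openai": {"openai", "openai-chat", "openai_chat"},
--     "ollama": {"ollama", "ollama-chat", "ollama_local"},
-- }
--
-- def _providers_compatible(requested: str, actual: str) -> bool:
--     req = requested.lower().strip()
--     act = actual.lower().strip()
--     if req == act:
--         return True
--     for canonical, aliases in _PROVIDER_ALIASES.items():
--         if req in aliases and act in aliases:
--             return True
--     return False
-- ===== SOURCE B (Python) =====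
-- _PROVIDER_ALIASES: dict[str, set[str]] = {
--     "openai": {"openai", "openai-chat", "openai_chat"},
--     "ollama": {"ollama", "ollama-chat", "ollama_local"},
-- }
--
-- _REV: dict[str, str] = {
--     alias: canonical
--     for canonical, group in _PROVIDER_ALIASES.items()
--     for alias in group
-- }
--
-- def _providers_compatible(requested: str, actual: str) -> bool:
--     req = requested.lower().strip()
--     act = actual.lower().strip()
--     if req == act:
--         return True
--     cr = _REV.get(req)
--     ca = _REV.get(act)
--     return cr is not None and cr == ca
-- ===== Notes on version B (the rewrite author's own statement) =====
-- stated objective: simpler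
-- what changed: Replaces the per-call scan over every alias group (membership-testing both strings in each set) with a reverse alias->canonical index built once at module load; the function becomes two lookups and a None-guarded comparison.
import Mathlib
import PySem

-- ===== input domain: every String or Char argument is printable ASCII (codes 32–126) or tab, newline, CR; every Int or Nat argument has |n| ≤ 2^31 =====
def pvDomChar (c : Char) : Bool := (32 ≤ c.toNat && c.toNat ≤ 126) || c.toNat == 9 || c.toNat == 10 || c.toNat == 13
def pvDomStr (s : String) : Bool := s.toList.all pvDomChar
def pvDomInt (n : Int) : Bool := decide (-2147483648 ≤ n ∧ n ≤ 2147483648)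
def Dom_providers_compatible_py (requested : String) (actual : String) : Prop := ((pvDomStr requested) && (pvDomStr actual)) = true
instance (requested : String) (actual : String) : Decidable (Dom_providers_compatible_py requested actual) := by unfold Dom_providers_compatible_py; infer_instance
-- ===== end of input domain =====

-- B replaces A's per-call scan over every alias group with a reverse alias→canonical
-- index built once, so each call is two lookups and a None-guarded comparison (objective: simpler).

-- ===== PORT A =====
-- _PROVIDER_ALIASES: dict canonical -> set of aliases (shared module constant)
def pvAliasGroups : List (String × PySem.Set String) :=
  [("openai", PySem.Set.ofList ["openai", "openai-chat", "openai_chat"]),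
   ("ollama", PySem.Set.ofList ["ollama", "ollama-chat", "ollama_local"])]

-- the "for canonical, aliases in _PROVIDER_ALIASES.items()" loop with early "return True"
def pvLoopA (req act : String) : List (String × PySem.Set String) → Bool
  | [] => false
  | (_, aliases) :: rest =>
      if PySem.Set.contains aliases req && PySem.Set.contains aliases act then true
      else pvLoopA req act rest

def providers_compatible_py (requested : String) (actual : String) : Bool :=
  let req := PySem.Str.strip (PySem.Str.lower requested)
  let act := PySem.Str.strip (PySem.Str.lower actual)
  if req == act then true else pvLoopA req act pvAliasGroups

-- ===== PORT B =====
-- _REV = {alias: canonical for canonical, group in _PROVIDER_ALIASES.items() for alias in group}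
-- (values inside one group coincide, so the set-iteration order cannot affect lookups)
def pvRev : PySem.Dict String String :=
  pvAliasGroups.foldl
    (fun d p => p.2.foldl (fun d al => d.insert al p.1) d)
    PySem.Dict.empty

def providers_compatible_py_alt (requested : String) (actual : String) : Bool :=
  let req := PySem.Str.strip (PySem.Str.lower requested)
  let act := PySem.Str.strip (PySem.Str.lower actual)
  if req == act then true
  else
    let cr := PySem.Dict.get? pvRev req
    let ca := PySem.Dict.get? pvRev act
    cr.isSome && (cr == ca)


-- ===== PRECONDITION & SPEC =====
def Spec_providers_compatible_py (requested : String) (actual : String) (out : Bool) : Prop := out = providers_compatible_py_alt requested actual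
instance (requested : String) (actual : String) (out : Bool) : Decidable (Spec_providers_compatible_py requested actual out) := by unfold Spec_providers_compatible_py; infer_instance

-- ===== CLAIM (what is proved, stated in full; the proofs are below) =====
def Claim_equal_providers_compatible_py : Prop := ∀ (requested : String) (actual : String), Dom_providers_compatible_py requested actual → Spec_providers_compatible_py requested actual (providers_compatible_py requested actual)

-- ===== LEMMAS AND PROOFS =====

-- A's group scan agrees with B's two reverse-index lookups, for arbitrary strings.
theorem pvScan_eq_lookup (r a : String) :
    pvLoopA r a pvAliasGroups =
      ((PySem.Dict.get? pvRev r).isSome && (PySem.Dict.get? pvRev r == PySem.Dict.get? pvRev a)) := by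
  have hrev : pvRev.items = [("openai","openai"),("openai-chat","openai"),("openai_chat","openai"),
      ("ollama","ollama"),("ollama-chat","ollama"),("ollama_local","ollama")] := by decide
  by_cases hr : r = "openai" ∨ r = "openai-chat" ∨ r = "openai_chat" ∨ r = "ollama" ∨ r = "ollama-chat" ∨ r = "ollama_local"
  · by_cases ha : a = "openai" ∨ a = "openai-chat" ∨ a = "openai_chat" ∨ a = "ollama" ∨ a = "ollama-chat" ∨ a = "ollama_local"
    · rcases hr with rfl|rfl|rfl|rfl|rfl|rfl <;> rcases ha with rfl|rfl|rfl|rfl|rfl|rfl <;> decide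
    · push_neg at ha
      obtain ⟨a1,a2,a3,a4,a5,a6⟩ := ha
      rcases hr with rfl|rfl|rfl|rfl|rfl|rfl <;>
        simp [pvLoopA, pvAliasGroups, hrev, PySem.Dict.get?,
              PySem.Set.contains, PySem.Set.ofList,
              PySem.Set.add, List.find?, beq_eq_decide, a1,a2,a3,a4,a5,a6, Ne.symm a1, Ne.symm a2, Ne.symm a3, Ne.symm a4, Ne.symm a5, Ne.symm a6]
  · push_neg at hr
    obtain ⟨r1,r2,r3,r4,r5,r6⟩ := hr
    simp [pvLoopA, pvAliasGroups, hrev, PySem.Dict.get?,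
          PySem.Set.contains, PySem.Set.ofList,
          PySem.Set.add, List.find?, beq_eq_decide, r1,r2,r3,r4,r5,r6, Ne.symm r1, Ne.symm r2, Ne.symm r3, Ne.symm r4, Ne.symm r5, Ne.symm r6]

-- ===== VERDICT (by name: the statement is the Claim_ definition above) =====
theorem providers_compatible_py_spec : Claim_equal_providers_compatible_py := by
  intro requested actual _
  show providers_compatible_py requested actual = providers_compatible_py_alt requested actual
  simp only [providers_compatible_py, providers_compatible_py_alt]
  split
  · rfl
  · exact pvScan_eq_lookup _ _
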